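-- pv_equiv track=rewrite | github.com/Mercerenies/eulers-melting-pot | etc/problem98.py | try_substitution
-- ===== SOURCE A (Python) =====
-- def try_substitution(word, square):
--     assert(len(word) == len(square))
--     used_digits = set()
--     substitution = {}
--     for i in range(len(word)):
--         if word[i] not in substitution:
--             if square[i] in used_digits:
--                 return None
--             substitution[word[i]] = square[i]
--             used_digits.add(square[i])
--         elif substitution[word[i]] != square[i]:
--             return None
--     return substitution
-- ===== SOURCE B (Python) =====
-- def try_substitution(word, square):
--     assert(len(word) == len(square))
--     # Classic "isomorphic strings" algorithm: compare first-occurrence indices.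
--     # The substitution is consistent and injective iff, at every position, the
--     # first occurrence of word[i] in word and of square[i] in square coincide.
--     first_w = {}
--     first_s = {}
--     for i, (c, d) in enumerate(zip(word, square)):
--         if first_w.setdefault(c, i) != first_s.setdefault(d, i):
--             return None
--     return {c: square[i] for c, i in first_w.items()}
-- ===== Notes on version B (the rewrite author's own statement) =====
-- stated objective: alternative
-- what changed: Replaces A's substitution dict + used_digits set with the classic isomorphic-strings algorithm: two dicts record the FIRST-OCCURRENCE INDEX of each char in word and in square, positions are compared via setdefault, and the substitution dict is only constructed afterwards from those indices; correct because a consistent injective substitution exists iff the two strings have the same first-occurrence pattern.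
import Mathlib
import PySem

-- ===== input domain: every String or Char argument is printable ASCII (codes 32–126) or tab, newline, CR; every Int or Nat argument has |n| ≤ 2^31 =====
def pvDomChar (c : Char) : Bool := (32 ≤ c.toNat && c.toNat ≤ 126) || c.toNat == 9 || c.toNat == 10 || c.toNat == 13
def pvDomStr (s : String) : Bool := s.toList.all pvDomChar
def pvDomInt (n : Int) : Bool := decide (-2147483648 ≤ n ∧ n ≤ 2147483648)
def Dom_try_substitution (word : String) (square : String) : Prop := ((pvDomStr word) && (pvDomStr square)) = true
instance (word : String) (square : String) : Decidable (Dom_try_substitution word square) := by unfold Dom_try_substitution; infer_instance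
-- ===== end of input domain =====

-- B replaces A's substitution dict + used_digits set by the classic isomorphic-strings
-- algorithm (compare first-occurrence indices, build the dict afterwards); equivalence of
-- RETURN VALUES on inputs of equal length (the assert raises otherwise; excluded by Pre_).

-- ===== PORT A =====
-- the for-loop of A: walks both strings in step (i ranges over range(len(word)); Pre_ gives equal lengths)
def tsA : List Char → List Char → PySem.Set String → PySem.Dict String String → Option (PySem.Dict String String)
  | [], _, _, sub => some sub
  | _ :: _, [], _, _ => none      -- unreachable under Pre_ (equal lengths)
  | c :: cs, d :: ds, used, sub =>
    let wc := String.ofList [c]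
    let sc := String.ofList [d]
    if sub.contains wc = false then        -- if word[i] not in substitution
      if used.contains sc then none        --   if square[i] in used_digits: return None
      else tsA cs ds (used.add sc) (sub.insert wc sc)
    else if sub.getD wc "" ≠ sc then none  -- elif substitution[word[i]] != square[i]: return None
    else tsA cs ds used sub

def try_substitution (word : String) (square : String) : Option (List (String × String)) :=
  if PySem.Str.len word = PySem.Str.len square then   -- assert; raises outside Pre_
    (tsA word.toList square.toList PySem.Set.empty PySem.Dict.empty).map PySem.Dict.items
  else none

-- ===== PORT B =====
-- the for-loop of B: for i, (c, d) in enumerate(zip(word, square)); first_w.setdefault(c, i)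
-- is read as its value (fw.get? c).getD i and its state update fw.setdefault c i
def tsB : List Char → List Char → Int → PySem.Dict String Int → PySem.Dict String Int →
    Option (PySem.Dict String Int)
  | [], _, _, fw, _ => some fw
  | _ :: _, [], _, fw, _ => some fw       -- zip stops at the shorter string
  | c :: cs, d :: ds, i, fw, fs =>
    let a := (fw.get? (String.ofList [c])).getD i
    let b := (fs.get? (String.ofList [d])).getD i
    if a ≠ b then none
    else tsB cs ds (i + 1) (fw.setdefault (String.ofList [c]) i) (fs.setdefault (String.ofList [d]) i)

-- the final comprehension {c: square[i] for c, i in first_w.items()}; every stored index i is a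
-- valid index into square, so pyGet? returns some there and the .getD "" default is never used
def finB (square : String) (fw : PySem.Dict String Int) : List (String × String) :=
  fw.items.map (fun p => (p.1, ((PySem.Str.pyGet? square p.2).map (fun ch => String.ofList [ch])).getD ""))

def try_substitution_alt (word : String) (square : String) : Option (List (String × String)) :=
  if PySem.Str.len word = PySem.Str.len square then   -- assert; raises outside Pre_
    (tsB word.toList square.toList 0 PySem.Dict.empty PySem.Dict.empty).map (finB square)
  else none

-- ===== PRECONDITION & SPEC =====
-- Pre_: the assert raises AssertionError on unequal lengths; exactly those inputs are excluded.
def Pre_try_substitution (word : String) (square : String) : Prop :=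
  PySem.Str.len word = PySem.Str.len square
instance (word : String) (square : String) : Decidable (Pre_try_substitution word square) := by
  unfold Pre_try_substitution; infer_instance

def pvWitness_try_substitution : String × String := ("abca", "1221")

def Spec_try_substitution (word : String) (square : String) (out : Option (List (String × String))) : Prop := out = try_substitution_alt word square
instance (word : String) (square : String) (out : Option (List (String × String))) : Decidable (Spec_try_substitution word square out) := by unfold Spec_try_substitution; infer_instance

-- ===== CLAIM (what is proved, stated in full; the proofs are below) =====
def Claim_equal_try_substitution : Prop := ∀ (word : String) (square : String), Dom_try_substitution word square → Pre_try_substitution word square → Spec_try_substitution word square (try_substitution word square)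

-- ===== LEMMAS AND PROOFS =====

-- ghost table L: one entry (c, v, j) per distinct char c of the processed prefix of word,
-- with v its substituted char (as 1-char string) and j the first-occurrence index; all four
-- loop states of both ports are projections of L
theorem main_inv (square : String) (rw : List Char) :
    ∀ (rs P : List Char) (L : List (String × String × Int)),
    rw.length = rs.length →
    square.toList = P ++ rs →
    (L.map (fun t => t.1)).Nodup →
    (L.map (fun t => t.2.1)).Nodup →
    (L.map (fun t => t.2.2)).Nodup →
    (∀ t ∈ L, 0 ≤ t.2.2 ∧ t.2.2 < (P.length : Int)) →
    (∀ t ∈ L, (PySem.Str.pyGet? square t.2.2).map (fun ch => String.ofList [ch]) = some t.2.1) →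
    (tsA rw rs (L.map (fun t => t.2.1)) (PySem.Dict.mk (L.map (fun t => (t.1, t.2.1))))).map PySem.Dict.items
      = (tsB rw rs (P.length : Int) (PySem.Dict.mk (L.map (fun t => (t.1, t.2.2))))
           (PySem.Dict.mk (L.map (fun t => (t.2.1, t.2.2))))).map (finB square) := by
  induction rw with
  | nil =>
    intro rs P L hlen hsq hk hv hj hb hval
    cases rs with
    | cons d ds => simp at hlen
    | nil =>
      simp only [tsA, tsB, Option.map_some]
      congr 1
      show L.map (fun t => (t.1, t.2.1))
        = ((PySem.Dict.mk (L.map (fun t => (t.1, t.2.2)))).items.map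
            (fun p => (p.1, ((PySem.Str.pyGet? square p.2).map (fun ch => String.ofList [ch])).getD "")))
      show L.map (fun t => (t.1, t.2.1))
        = (L.map (fun t => (t.1, t.2.2))).map
            (fun p => (p.1, ((PySem.Str.pyGet? square p.2).map (fun ch => String.ofList [ch])).getD ""))
      rw [List.map_map]
      refine (List.map_congr_left ?_).symm
      intro t ht
      have h := hval t ht
      simp only [pysem] at h
      simp [h]
  | cons c cs ih =>
    intro rs P L hlen hsq hk hv hj hb hval
    cases rs with
    | nil => simp at hlen
    | cons d ds =>
      have hkeysW : (PySem.Dict.mk (L.map (fun t => (t.1, t.2.2)))).keys = L.map (fun t => t.1) := by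
        show (L.map (fun t => (t.1, t.2.2))).map Prod.fst = _
        simp
      have hkeysS : (PySem.Dict.mk (L.map (fun t => (t.2.1, t.2.2)))).keys = L.map (fun t => t.2.1) := by
        show (L.map (fun t => (t.2.1, t.2.2))).map Prod.fst = _
        simp
      have hkeysA : (PySem.Dict.mk (L.map (fun t => (t.1, t.2.1)))).keys = L.map (fun t => t.1) := by
        show (L.map (fun t => (t.1, t.2.1))).map Prod.fst = _
        simp
      simp only [tsA, tsB]
      by_cases hC : String.ofList [c] ∈ L.map (fun t => t.1)
      · -- word char already substituted
        obtain ⟨t0, ht0, ht0c⟩ := List.mem_map.mp hC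
        have hcontA : (PySem.Dict.mk (L.map (fun t => (t.1, t.2.1)))).contains (String.ofList [c]) = true := by
          rw [PySem.Dict.contains_iff_mem_keys, hkeysA]; exact hC
        have hgetA : (PySem.Dict.mk (L.map (fun t => (t.1, t.2.1)))).getD (String.ofList [c]) "" = t0.2.1 :=
          PySem.Dict.getD_of_mem_items _ (by
            exact List.mem_map.mpr ⟨t0, ht0, by rw [ht0c]⟩) (by rw [hkeysA]; exact hk) ""
        have hgetW : (PySem.Dict.mk (L.map (fun t => (t.1, t.2.2)))).get? (String.ofList [c]) = some t0.2.2 :=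
          PySem.Dict.get?_of_mem_items _ (by
            exact List.mem_map.mpr ⟨t0, ht0, by rw [ht0c]⟩) (by rw [hkeysW]; exact hk)
        have hsdW : (PySem.Dict.mk (L.map (fun t => (t.1, t.2.2)))).setdefault (String.ofList [c]) (P.length : Int)
            = PySem.Dict.mk (L.map (fun t => (t.1, t.2.2))) :=
          PySem.Dict.setdefault_of_contains _ _ (by rw [PySem.Dict.contains_iff_mem_keys, hkeysW]; exact hC)
        rw [if_neg (by simp [hcontA]), hgetA, hgetW, hsdW]
        by_cases hvd : t0.2.1 = String.ofList [d]
        · -- consistent: both continue with unchanged state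
          have hgetS : (PySem.Dict.mk (L.map (fun t => (t.2.1, t.2.2)))).get? (String.ofList [d]) = some t0.2.2 :=
            PySem.Dict.get?_of_mem_items _ (by
              exact List.mem_map.mpr ⟨t0, ht0, by rw [hvd]⟩) (by rw [hkeysS]; exact hv)
          have hsdS : (PySem.Dict.mk (L.map (fun t => (t.2.1, t.2.2)))).setdefault (String.ofList [d]) (P.length : Int)
              = PySem.Dict.mk (L.map (fun t => (t.2.1, t.2.2))) :=
            PySem.Dict.setdefault_of_contains _ _ (by
              rw [PySem.Dict.contains_iff_mem_keys, hkeysS]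
              exact List.mem_map.mpr ⟨t0, ht0, hvd⟩)
          rw [if_neg (by simp [hvd]), hgetS, hsdS]
          rw [if_neg (by simp)]
          have := ih ds (P ++ [d]) L (by simpa using hlen)
            (by rw [hsq]; simp)
            hk hv hj
            (fun t ht => ⟨(hb t ht).1, by have := (hb t ht).2; simp; omega⟩)
            hval
          simpa using this
        · -- inconsistent: both return None
          rw [if_pos (by simp [hvd])]
          by_cases hD : String.ofList [d] ∈ L.map (fun t => t.2.1)
          · obtain ⟨t1, ht1, ht1d⟩ := List.mem_map.mp hD
            have hgetS : (PySem.Dict.mk (L.map (fun t => (t.2.1, t.2.2)))).get? (String.ofList [d]) = some t1.2.2 :=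
              PySem.Dict.get?_of_mem_items _ (by
                exact List.mem_map.mpr ⟨t1, ht1, by rw [ht1d]⟩) (by rw [hkeysS]; exact hv)
            rw [hgetS]
            have hne : t0.2.2 ≠ t1.2.2 := by
              intro he
              have : t0 = t1 := List.inj_on_of_nodup_map hj ht0 ht1 he
              exact hvd (this ▸ ht1d)
            rw [if_pos (by simpa using hne)]
            rfl
          · have hgetS : (PySem.Dict.mk (L.map (fun t => (t.2.1, t.2.2)))).get? (String.ofList [d]) = none := by
              rw [PySem.Dict.get?_eq_none_iff_not_mem_keys, hkeysS]; exact hD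
            rw [hgetS]
            have hne : t0.2.2 ≠ (P.length : Int) := by
              have := (hb t0 ht0).2; omega
            rw [if_pos (by simpa using hne)]
            rfl
      · -- fresh word char
        have hcontA : (PySem.Dict.mk (L.map (fun t => (t.1, t.2.1)))).contains (String.ofList [c]) = false := by
          rw [PySem.Dict.contains_eq_decide_mem_keys, hkeysA]; simpa using hC
        have hgetW : (PySem.Dict.mk (L.map (fun t => (t.1, t.2.2)))).get? (String.ofList [c]) = none := by
          rw [PySem.Dict.get?_eq_none_iff_not_mem_keys, hkeysW]; exact hC
        rw [if_pos hcontA, hgetW]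
        by_cases hD : String.ofList [d] ∈ L.map (fun t => t.2.1)
        · -- digit already used: both return None
          obtain ⟨t1, ht1, ht1d⟩ := List.mem_map.mp hD
          have hgetS : (PySem.Dict.mk (L.map (fun t => (t.2.1, t.2.2)))).get? (String.ofList [d]) = some t1.2.2 :=
            PySem.Dict.get?_of_mem_items _ (by
              exact List.mem_map.mpr ⟨t1, ht1, by rw [ht1d]⟩) (by rw [hkeysS]; exact hv)
          rw [hgetS]
          rw [if_pos (by simpa [PySem.Set.contains] using hD)]
          have hne : (P.length : Int) ≠ t1.2.2 := by
            have := (hb t1 ht1).2; omega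
          rw [if_pos (by simpa using hne)]
          rfl
        · -- both fresh: append (c, d, P.length) to the table and recurse
          have hgetS : (PySem.Dict.mk (L.map (fun t => (t.2.1, t.2.2)))).get? (String.ofList [d]) = none := by
            rw [PySem.Dict.get?_eq_none_iff_not_mem_keys, hkeysS]; exact hD
          rw [hgetS]
          rw [if_neg (by simpa [PySem.Set.contains] using hD), if_neg (by simp)]
          -- state updates are appends
          have hcontW : (PySem.Dict.mk (L.map (fun t => (t.1, t.2.2)))).contains (String.ofList [c]) = false := by
            rw [PySem.Dict.contains_eq_decide_mem_keys, hkeysW]; simpa using hC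
          have hcontS : (PySem.Dict.mk (L.map (fun t => (t.2.1, t.2.2)))).contains (String.ofList [d]) = false := by
            rw [PySem.Dict.contains_eq_decide_mem_keys, hkeysS]; simpa using hD
          set L' : List (String × String × Int) := L ++ [(String.ofList [c], String.ofList [d], (P.length : Int))] with hL'
          have eqA : (PySem.Dict.mk (L.map (fun t => (t.1, t.2.1)))).insert (String.ofList [c]) (String.ofList [d])
              = PySem.Dict.mk (L'.map (fun t => (t.1, t.2.1))) := by
            apply PySem.Dict.ext
            rw [PySem.Dict.items_insert_of_not_contains _ _ hcontA]
            simp [hL']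
          have eqW : (PySem.Dict.mk (L.map (fun t => (t.1, t.2.2)))).setdefault (String.ofList [c]) (P.length : Int)
              = PySem.Dict.mk (L'.map (fun t => (t.1, t.2.2))) := by
            rw [PySem.Dict.setdefault_of_not_contains _ _ hcontW]
            apply PySem.Dict.ext
            rw [PySem.Dict.items_insert_of_not_contains _ _ hcontW]
            simp [hL']
          have eqS : (PySem.Dict.mk (L.map (fun t => (t.2.1, t.2.2)))).setdefault (String.ofList [d]) (P.length : Int)
              = PySem.Dict.mk (L'.map (fun t => (t.2.1, t.2.2))) := by
            rw [PySem.Dict.setdefault_of_not_contains _ _ hcontS]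
            apply PySem.Dict.ext
            rw [PySem.Dict.items_insert_of_not_contains _ _ hcontS]
            simp [hL']
          have eqU : PySem.Set.add (L.map (fun t => t.2.1)) (String.ofList [d])
              = L'.map (fun t => t.2.1) := by
            simp only [PySem.Set.add]
            rw [if_neg (by simpa [PySem.Set.contains] using hD)]
            simp [hL']
          rw [eqA, eqW, eqS, eqU]
          have hidx : ∀ t ∈ L', 0 ≤ t.2.2 ∧ t.2.2 < ((P ++ [d]).length : Int) := by
            intro t ht
            simp only [hL', List.mem_append, List.mem_singleton] at ht
            rcases ht with ht | ht
            · obtain ⟨h1, h2⟩ := hb t ht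
              simp only [List.length_append, List.length_cons, List.length_nil]
              push_cast
              omega
            · subst ht
              simp only [List.length_append, List.length_cons, List.length_nil]
              push_cast
              omega
          have hvald : (PySem.Str.pyGet? square ((P.length : Nat) : Int)).map (fun ch => String.ofList [ch])
              = some (String.ofList [d]) := by
            rw [PySem.Str.pyGet?_natCast, hsq]
            rw [List.getElem?_append_right (le_refl _)]
            simp
          have := ih ds (P ++ [d]) L' (by simpa using hlen)
            (by rw [hsq]; simp)
            (by simp only [hL', List.map_append, List.nodup_append]
                refine ⟨hk, by simp, ?_⟩
                intro x hx y hy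
                simp only [List.map_cons, List.map_nil, List.mem_singleton] at hy
                subst hy
                intro he; rw [he] at hx; exact hC (by simpa using hx))
            (by simp only [hL', List.map_append, List.nodup_append]
                refine ⟨hv, by simp, ?_⟩
                intro x hx y hy
                simp only [List.map_cons, List.map_nil, List.mem_singleton] at hy
                subst hy
                intro he; rw [he] at hx; exact hD (by simpa using hx))
            (by simp only [hL', List.map_append, List.nodup_append]
                refine ⟨hj, by simp, ?_⟩
                intro x hx y hy
                simp only [List.map_cons, List.map_nil, List.mem_singleton] at hy
                subst hy
                obtain ⟨t, ht, htx⟩ := List.mem_map.mp hx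
                have := (hb t ht).2
                intro he; rw [he] at htx; omega)
            hidx
            (by intro t ht
                simp only [hL', List.mem_append, List.mem_singleton] at ht
                rcases ht with ht | ht
                · exact hval t ht
                · subst ht; exact hvald)
          have hcast : ((P ++ [d]).length : Int) = (P.length : Int) + 1 := by simp
          rw [hcast] at this
          exact this

-- ===== VERDICT (by name: the statement is the Claim_ definition above) =====
theorem try_substitution_spec : Claim_equal_try_substitution := by
  intro word square _ hpre
  unfold Pre_try_substitution at hpre
  unfold Spec_try_substitution try_substitution try_substitution_alt
  rw [if_pos hpre, if_pos hpre]
  have hlen : word.toList.length = square.toList.length := by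
    simp only [PySem.Str.len_eq] at hpre
    exact_mod_cast hpre
  have := main_inv square word.toList square.toList [] []
    hlen (by simp) (by simp) (by simp) (by simp) (by simp) (by simp)
  simpa using this
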